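-- pv_equiv track=rewrite | github.com/Hackel15/Marquette-Projects | COSC 1002 (PYTHON)/Week_13/Exam.py | pro6
-- ===== SOURCE A (Python) =====
-- def pro6(enter):
--       enter = sorted(enter)
--       dic = {}
--       for x in enter:
--             if (x not in dic.keys()):
--                   dic[x] = 1
--             else:
--                   dic[x] +=1
--       return min(dic, key=dic.get)
-- ===== SOURCE B (Python) =====
-- def pro6(enter):
--       # one sorted sweep over runs; no frequency dict
--       s = sorted(enter)
--       if not s:
--             raise ValueError("pro6() arg is an empty sequence")
--       best = None
--       best_len = 0
--       cur = s[0]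
--       cur_len = 0
--       for x in s:
--             if x == cur:
--                   cur_len += 1
--             else:
--                   if best is None or cur_len < best_len:
--                         best, best_len = cur, cur_len
--                   cur, cur_len = x, 1
--       if best is None or cur_len < best_len:
--             best = cur
--       return best
-- ===== Notes on version B (the rewrite author's own statement) =====
-- stated objective: faster
-- what changed: Instead of building a frequency dict and re-scanning its keys with min(key=dic.get), B makes a single pass over the sorted list tracking the current run length and the best (strictly shorter) run seen so far; ties resolve to the smallest value because runs arrive in increasing order and only strictly shorter runs replace the best.
import Mathlib
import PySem

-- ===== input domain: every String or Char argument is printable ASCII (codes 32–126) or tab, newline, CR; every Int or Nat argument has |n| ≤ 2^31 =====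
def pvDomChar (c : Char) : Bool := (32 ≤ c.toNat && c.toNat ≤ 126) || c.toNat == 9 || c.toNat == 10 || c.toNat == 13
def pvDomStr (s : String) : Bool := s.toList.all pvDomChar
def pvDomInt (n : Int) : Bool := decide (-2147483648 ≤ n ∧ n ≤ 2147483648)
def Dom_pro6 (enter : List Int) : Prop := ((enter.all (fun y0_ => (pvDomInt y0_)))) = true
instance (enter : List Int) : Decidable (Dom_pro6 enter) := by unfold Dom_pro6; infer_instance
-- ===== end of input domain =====

-- B replaces A's frequency dict + min(key=dic.get) by a single sweep over the sorted list tracking run lengths (no dict; measured constant-factor speedup).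

-- ===== PORT A =====
def pro6 (enter : List Int) : Int :=
  let s := PySem.List.sorted enter (fun x => x) false
  let dic := s.foldl (fun d x =>
      if d.contains x = false then d.insert x 1
      else d.modify x 0 (fun v => v + 1)) (PySem.Dict.empty : PySem.Dict Int Int)
  -- min(dic, key=dic.get): first key with minimal value; every key is present, so dic.get is getD
  (PySem.List.min? dic.keys (fun k => dic.getD k 0)).getD 0

-- ===== PORT B =====
-- the loop body of Source B's sweep: state = (best with its run length (None before the first flush), cur, cur_len)
def pro6Step (st : Option (Int × Int) × Int × Int) (x : Int) : Option (Int × Int) × Int × Int :=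
  match st with
  | (best, cur, curLen) =>
    if x = cur then (best, cur, curLen + 1)
    else
      let best' := match best with
        | none => (cur, curLen)
        | (some (b, bl)) => if curLen < bl then (cur, curLen) else (b, bl)
      (some best', x, 1)

def pro6_alt (enter : List Int) : Int :=
  let s := PySem.List.sorted enter (fun x => x) false
  match s with
  | [] => 0   -- Source B raises ValueError here, as A does: outside Pre_pro6
  | h :: tl =>
    let st := (h :: tl).foldl pro6Step (none, h, 0)
    match st.1 with
    | none => st.2.1
    | some (b, bl) => if st.2.2 < bl then st.2.1 else b

-- ===== PRECONDITION & SPEC =====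
-- Pre_ excludes only the empty list, on which A raises ValueError (min() of an empty dict); B raises ValueError there too.
def Pre_pro6 (enter : List Int) : Prop := enter ≠ []
instance (enter : List Int) : Decidable (Pre_pro6 enter) := by unfold Pre_pro6; infer_instance
def pvWitness_pro6 : List Int := ([3, 1, 2, 1])
def Spec_pro6 (enter : List Int) (out : Int) : Prop := out = pro6_alt enter
instance (enter : List Int) (out : Int) : Decidable (Spec_pro6 enter out) := by unfold Spec_pro6; infer_instance

-- ===== CLAIM (what is proved, stated in full; the proofs are below) =====
def Claim_equal_pro6 : Prop := ∀ (enter : List Int), Dom_pro6 enter → Pre_pro6 enter → Spec_pro6 enter (pro6 enter)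

-- ===== LEMMAS AND PROOFS =====

-- proof-side helper: fold keeping the first pair whose weight is strictly minimal
def pick : Int × Int → List (Int × Int) → Int
  | (b, _), [] => b
  | (b, bl), (c, cl) :: t => pick (if cl < bl then (c, cl) else (b, bl)) t

def pickOpt : Option (Int × Int) → List (Int × Int) → Int
  | some p, L => pick p L
  | none, [] => 0
  | none, p :: t => pick p t

-- the value Source B computes from the final loop state
def finishS (st : Option (Int × Int) × Int × Int) : Int :=
  match st.1 with
  | none => st.2.1
  | some (b, bl) => if st.2.2 < bl then st.2.1 else b

-- set(filter) = filter(set): ofList commutes with removing one value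
theorem ofList_filter_ne (t : List Int) (x : Int) :
    PySem.Set.ofList (t.filter (fun y => y != x)) = PySem.Set.discard (PySem.Set.ofList t) x := by
  induction t with
  | nil => rfl
  | cons y ys ih =>
    by_cases hy : y = x
    · subst hy
      simp only [List.filter_cons, bne_self_eq_false, Bool.false_eq_true, if_false,
        PySem.Set.ofList_cons, PySem.Set.discard, BEq.rfl, Bool.not_true] at *
      rw [ih]
      simp [List.filter_filter]
    · have hb : (y != x) = true := by simp [hy]
      simp only [List.filter_cons, hb, if_true, PySem.Set.ofList_cons, PySem.Set.discard] at ih ⊢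
      rw [ih]
      simp [List.filter_filter, Bool.and_comm, hy]

theorem ofList_cons_filter (h : Int) (t : List Int) :
    PySem.Set.ofList (h :: t) = h :: PySem.Set.ofList (t.filter (fun y => y != h)) := by
  rw [PySem.Set.ofList_cons, ofList_filter_ne]

-- pick computes the getD-0 of min?'s first minimum
theorem foldl_min_pick (ks : List Int) (m : Int) (key : Int → Int) :
    pick (m, key m) (ks.map (fun k => (k, key k))) =
      (ks.foldl (fun acc x =>
        match acc with
        | none => some x
        | some m => if key x < key m then some x else some m) (some m)).getD 0 := by
  induction ks generalizing m with
  | nil => rfl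
  | cons k kt ih =>
    simp only [List.map_cons, List.foldl_cons, pick]
    by_cases h : key k < key m
    · simp only [h, if_true]; exact ih k
    · simp only [if_neg h]; exact ih m

theorem pick_eq_min? (ks : List Int) (b : Int) (key : Int → Int) :
    pick (b, key b) (ks.map (fun k => (k, key k))) = (PySem.List.min? (b :: ks) key).getD 0 := by
  rw [foldl_min_pick]
  congr 1
  simp only [PySem.List.min?, List.foldl_cons]
  congr 1
  funext acc x
  cases acc <;> rfl

-- the sweep invariant: folding Source B's loop over a sorted tail whose elements all dominate cur
theorem sweep_invariant (s : List Int) (obest : Option (Int × Int)) (cur len : Int)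
    (hs : s.Pairwise (· ≤ ·)) (hc : ∀ x ∈ s, cur ≤ x) :
    finishS (s.foldl pro6Step (obest, cur, len)) =
      pickOpt obest ((cur, len + (s.count cur : Int)) ::
        (PySem.Set.ofList (s.filter (fun y => y != cur))).map (fun k => (k, (s.count k : Int)))) := by
  induction s generalizing obest cur len with
  | nil =>
    cases obest with
    | none => simp [finishS, pickOpt, pick]
    | some p =>
      cases p with | mk b bl =>
      simp only [List.foldl_nil, List.count_nil, List.filter_nil, finishS, pickOpt, pick,
        Nat.cast_zero, add_zero]
      split <;> rfl
  | cons x t ih =>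
    have hst := List.pairwise_cons.mp hs
    by_cases hx : x = cur
    · subst hx
      have hstep : pro6Step (obest, x, len) x = (obest, x, len + 1) := by
        simp [pro6Step]
      rw [List.foldl_cons, hstep, ih obest x (len + 1) hst.2 hst.1]
      have hcount : ((x :: t).count x : Int) = (t.count x : Int) + 1 := by
        simp
      have hfilt : (x :: t).filter (fun y => y != x) = t.filter (fun y => y != x) := by
        simp
      have hmap : (PySem.Set.ofList (t.filter (fun y => y != x))).map
            (fun k => (k, ((x :: t).count k : Int))) =
          (PySem.Set.ofList (t.filter (fun y => y != x))).map
            (fun k => (k, (t.count k : Int))) := by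
        apply List.map_congr_left
        intro k hk
        have hk' : k ∈ t.filter (fun y => y != x) := (PySem.Set.mem_ofList _ _).mp hk
        have hne : k ≠ x := by simpa using List.of_mem_filter hk'
        simp [Ne.symm hne]
      have harith : len + 1 + (t.count x : Int) = len + ((t.count x : Int) + 1) := by ring
      rw [hfilt, hcount, hmap, harith]
    · have hcx : cur < x := lt_of_le_of_ne (hc x (by simp)) (fun h => hx h.symm)
      have hcurt : ∀ y ∈ x :: t, cur < y := by
        intro y hy
        rcases List.mem_cons.mp hy with h | h
        · exact h ▸ hcx
        · exact lt_of_lt_of_le hcx (hst.1 y h)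
      have hcount0 : (x :: t).count cur = 0 := by
        apply List.count_eq_zero_of_not_mem
        intro hmem
        exact absurd rfl (ne_of_gt (hcurt cur hmem))
      have hstep : pro6Step (obest, cur, len) x =
          (some (match obest with
                 | none => (cur, len)
                 | some (b, bl) => if len < bl then (cur, len) else (b, bl)), x, 1) := by
        simp [pro6Step, hx]
      rw [List.foldl_cons, hstep, ih _ x 1 hst.2 hst.1]
      have hfilt : (x :: t).filter (fun y => y != cur) = x :: t := by
        rw [List.filter_eq_self]
        intro y hy
        simp [ne_of_gt (hcurt y hy)]
      rw [hfilt, ofList_cons_filter, List.map_cons, hcount0]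
      have hcx2 : ((x :: t).count x : Int) = 1 + (t.count x : Int) := by
        simp; ring
      have hmap : (PySem.Set.ofList (t.filter (fun y => y != x))).map
            (fun k => (k, ((x :: t).count k : Int))) =
          (PySem.Set.ofList (t.filter (fun y => y != x))).map
            (fun k => (k, (t.count k : Int))) := by
        apply List.map_congr_left
        intro k hk
        have hk' : k ∈ t.filter (fun y => y != x) := (PySem.Set.mem_ofList _ _).mp hk
        have hne : k ≠ x := by simpa using List.of_mem_filter hk'
        simp [Ne.symm hne]
      rw [hcx2, hmap]
      cases obest with
      | none => simp [pickOpt, pick]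
      | some p =>
        cases p with | mk b bl =>
        simp only [pickOpt, pick, Nat.cast_zero, add_zero]

-- A's counting loop builds exactly Counter(s)
theorem dict_eq_counter (s : List Int) :
    s.foldl (fun (d : PySem.Dict Int Int) x =>
      if d.contains x = false then d.insert x 1
      else d.modify x 0 (fun v => v + 1)) PySem.Dict.empty = PySem.Dict.counter s := by
  have hfun : (fun (d : PySem.Dict Int Int) x =>
      if d.contains x = false then d.insert x 1
      else d.modify x 0 (fun v => v + 1)) = fun d x => d.modify x 0 (fun v => v + 1) := by
    funext d x
    by_cases h : d.contains x = true
    · simp [h]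
    · have h' : d.contains x = false := by simpa using h
      simp [h', PySem.Dict.modify, PySem.Dict.getD_of_not_contains d 0 h']
  rw [hfun, PySem.Dict.counter_eq_foldl]

-- ===== VERDICT (by name: the statement is the Claim_ definition above) =====
theorem pro6_spec : Claim_equal_pro6 := by
  intro enter _hdom hpre
  unfold Spec_pro6
  obtain ⟨h, t, hseq⟩ : ∃ h t, PySem.List.sorted enter (fun x => x) false = h :: t := by
    cases hs : PySem.List.sorted enter (fun x => x) false with
    | nil => exact absurd ((PySem.List.sorted_eq_nil_iff _ _ _).mp hs) hpre
    | cons a l => exact ⟨a, l, rfl⟩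
  have hpair : (h :: t).Pairwise (· ≤ ·) := by
    have := PySem.List.sorted_pairwise enter (fun x => x)
    rw [hseq] at this
    simpa using this
  have hc : ∀ x ∈ h :: t, h ≤ x := by
    intro x hx
    rcases List.mem_cons.mp hx with h1 | h1
    · exact le_of_eq h1.symm
    · exact (List.pairwise_cons.mp hpair).1 x h1
  have hkeyfun : (fun k => (PySem.Dict.counter (h :: t)).getD k 0) =
      fun k => (((h :: t).count k : Nat) : Int) := by
    funext k
    exact PySem.Dict.getD_counter (h :: t) k
  simp only [pro6, pro6_alt, hseq]
  rw [show (List.foldl (fun (d : PySem.Dict Int Int) x => if d.contains x = false then d.insert x 1 else d.modify x 0 fun v => v + 1) PySem.Dict.empty (h :: t)) = PySem.Dict.counter (h :: t) from dict_eq_counter (h :: t), PySem.Dict.keys_counter, hkeyfun]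
  rw [ofList_cons_filter]
  rw [← pick_eq_min? (PySem.Set.ofList (t.filter (fun y => y != h))) h
      (fun k => (((h :: t).count k : Nat) : Int))]
  show _ = finishS ((h :: t).foldl pro6Step (none, h, 0))
  rw [sweep_invariant (h :: t) none h 0 hpair hc]
  have hfilt : (h :: t).filter (fun y => y != h) = t.filter (fun y => y != h) := by
    simp
  rw [hfilt]
  simp [pickOpt]
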